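-- pv_equiv track=rewrite | github.com/iamdv43/PracticeDSA | CountMaxOperations.py | countMaxOperation
-- ===== SOURCE A (Python) =====
-- def countMaxOperation(log, target):
--     log = list(log)
--     target = list(target)
--     found = True
--     count = 0
--     while found:
--         for i in target:
--             if i in log:
--                 log.remove(i)
--             else:
--                 found = False
--         if found:
--             count += 1
--     return count
-- ===== SOURCE B (Python) =====
-- def countMaxOperation(log, target):
--     log_counts = {}
--     for x in log:
--         log_counts[x] = log_counts.get(x, 0) + 1
--     target_counts = {}
--     for x in target:
--         target_counts[x] = target_counts.get(x, 0) + 1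
--     return min(log_counts.get(e, 0) // c for e, c in target_counts.items())
-- ===== Notes on version B (the rewrite author's own statement) =====
-- stated objective: faster
-- what changed: Replaces the repeated remove-one-copy-per-pass simulation with two hash-map frequency counters and a closed-form min over e of log_count[e] // target_count[e].
import Mathlib
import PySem

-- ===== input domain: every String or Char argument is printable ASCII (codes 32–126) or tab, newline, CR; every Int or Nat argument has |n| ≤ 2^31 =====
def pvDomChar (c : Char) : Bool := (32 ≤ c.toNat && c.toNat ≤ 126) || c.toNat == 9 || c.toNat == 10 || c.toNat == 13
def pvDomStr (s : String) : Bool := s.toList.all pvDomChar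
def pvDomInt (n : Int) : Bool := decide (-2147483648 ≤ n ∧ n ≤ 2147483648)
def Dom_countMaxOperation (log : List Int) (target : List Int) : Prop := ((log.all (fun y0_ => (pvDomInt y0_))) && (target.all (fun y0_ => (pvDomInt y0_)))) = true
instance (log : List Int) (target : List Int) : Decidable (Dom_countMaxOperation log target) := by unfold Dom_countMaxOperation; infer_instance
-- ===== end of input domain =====

-- B replaces A's repeated remove-one-copy-per-pass simulation by two frequency counters and a
-- min of per-element count ratios (objective: faster).

-- ===== PORT A =====
-- One iteration of A's inner 'for i in target' loop, carrying (found, log):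
-- 'if i in log: log.remove(i) else: found = False'.
def pvPassA (target : List Int) (f : Bool) (log : List Int) : Bool × List Int :=
  target.foldl (fun st i =>
    if st.2.contains i then (st.1, (PySem.List.remove? st.2 i).getD st.2)  -- guard makes remove? some
    else (false, st.2)) (f, log)

-- A's 'while found' loop with fuel bounding the number of passes: when target ≠ [] (Pre_), every
-- pass that increments count removes target.length ≥ 1 elements of log, so log.length + 1 passes
-- always suffice; for target = [] the Python loop never terminates (outside Pre_).
def pvLoopA (target : List Int) : Nat → List Int → Int → Int
  | 0, _, count => count
  | fuel+1, log, count =>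
    let st := pvPassA target true log
    if st.1 then pvLoopA target fuel st.2 (count + 1) else count

def countMaxOperation (log : List Int) (target : List Int) : Int :=
  pvLoopA target (log.length + 1) log 0

-- ===== PORT B =====
def countMaxOperation_alt (log : List Int) (target : List Int) : Int :=
  let lc := log.foldl (fun d x => d.insert x (d.getD x 0 + 1)) PySem.Dict.empty
  let tc := target.foldl (fun d x => d.insert x (d.getD x 0 + 1)) PySem.Dict.empty
  match tc.items.map (fun p => PySem.Int.floordiv (lc.getD p.1 0) p.2) with
  | [] => 0           -- target = []: Python's min() raises ValueError; outside Pre_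
  | v :: vs => vs.foldl min v

-- ===== PRECONDITION & SPEC =====
-- Pre_ excludes target = [], on which A's while-loop never terminates (no element ever fails to be
-- found) and B's min() raises ValueError.
def Pre_countMaxOperation (log : List Int) (target : List Int) : Prop := target ≠ []
instance (log : List Int) (target : List Int) : Decidable (Pre_countMaxOperation log target) := by unfold Pre_countMaxOperation; infer_instance
def pvWitness_countMaxOperation : List Int × List Int := ([1, 2, 1, 2, 1], [1, 2])

def Spec_countMaxOperation (log : List Int) (target : List Int) (out : Int) : Prop := out = countMaxOperation_alt log target
instance (log : List Int) (target : List Int) (out : Int) : Decidable (Spec_countMaxOperation log target out) := by unfold Spec_countMaxOperation; infer_instance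

-- ===== CLAIM (what is proved, stated in full; the proofs are below) =====
def Claim_equal_countMaxOperation : Prop := ∀ (log : List Int) (target : List Int), Dom_countMaxOperation log target → Pre_countMaxOperation log target → Spec_countMaxOperation log target (countMaxOperation log target)

-- ===== LEMMAS AND PROOFS =====

-- the per-element count ratio and B's value as a natural number
def pvRatio (log target : List Int) (k : Int) : Nat := log.count k / target.count k

def pvNatB (log target : List Int) : Nat :=
  match (PySem.Set.ofList target).map (pvRatio log target) with
  | [] => 0
  | v :: vs => vs.foldl min v

-- one pass of A: found stays true iff target's multiset is contained in log, and the pass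
-- removes min(log.count e, target.count e) copies of each e
theorem pvPassA_spec (target : List Int) : ∀ (log : List Int) (f : Bool),
    (pvPassA target f log).1 = (f && decide (∀ e ∈ target, target.count e ≤ log.count e))
    ∧ ∀ e, (pvPassA target f log).2.count e = log.count e - min (log.count e) (target.count e) := by
  induction target with
  | nil =>
    intro log f
    exact ⟨by simp [pvPassA], fun e => by simp [pvPassA]⟩
  | cons i t ih =>
    intro log f
    by_cases hi : i ∈ log
    · have hstep : pvPassA (i :: t) f log = pvPassA t f (log.erase i) := by
        simp [pvPassA, hi, PySem.List.remove?_eq_some_erase log i hi]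
      rw [hstep]
      obtain ⟨h1, h2⟩ := ih (log.erase i) f
      have hci : 1 ≤ log.count i := List.one_le_count_iff.mpr hi
      have hE : ∀ e : Int, (log.erase i).count e = log.count e - (if e = i then 1 else 0) := by
        intro e
        by_cases he : e = i
        · subst he; simp [List.count_erase_self]
        · simp [List.count_erase_of_ne he, he]
      constructor
      · rw [h1]; congr 1
        simp only [decide_eq_decide]
        constructor
        · intro h e he
          rcases List.mem_cons.mp he with hei | het
          · subst hei
            by_cases het : e ∈ t
            · have := h e het; rw [hE] at this
              simp only [List.count_cons_self] at *; simp at this; omega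
            · have h0 : t.count e = 0 := List.count_eq_zero_of_not_mem het
              simp only [List.count_cons_self]; omega
          · by_cases hei : e = i
            · subst hei
              have := h e het; rw [hE] at this
              simp only [List.count_cons_self] at *; simp at this; omega
            · have := h e het; rw [hE] at this
              simp only [hei, if_false] at this
              rw [List.count_cons_of_ne (Ne.symm hei)]; omega
        · intro h e het
          rw [hE]
          by_cases hei : e = i
          · subst hei
            have := h e (List.mem_cons_of_mem _ het)
            rw [List.count_cons_self] at this; simp; omega
          · have := h e (List.mem_cons_of_mem _ het)
            rw [List.count_cons_of_ne (Ne.symm hei)] at this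
            simp only [hei, if_false]; omega
      · intro e
        rw [h2 e, hE e]
        by_cases hei : e = i
        · subst hei; rw [List.count_cons_self]; simp; omega
        · rw [List.count_cons_of_ne (Ne.symm hei)]; simp [hei]
    · have hstep : pvPassA (i :: t) f log = pvPassA t false log := by
        simp [pvPassA, hi]
      rw [hstep]
      obtain ⟨h1, h2⟩ := ih log false
      have hci : log.count i = 0 := List.count_eq_zero_of_not_mem hi
      constructor
      · rw [h1]
        have hno : ¬ (∀ e ∈ i :: t, (i :: t).count e ≤ log.count e) := by
          intro h
          have := h i List.mem_cons_self
          rw [List.count_cons_self, hci] at this; omega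
        rw [decide_eq_false hno]; simp
      · intro e
        rw [h2 e]
        by_cases hei : e = i
        · subst hei; rw [hci]; simp
        · rw [List.count_cons_of_ne (Ne.symm hei)]

theorem pv_foldl_min_sub_one (vs : List Nat) (v : Nat) :
    (vs.map (· - 1)).foldl min (v - 1) = vs.foldl min v - 1 := by
  induction vs generalizing v with
  | nil => rfl
  | cons x xs ih => simp only [List.map_cons, List.foldl_cons, ← ih]; congr 1; omega

theorem pv_foldl_min_int_cast (vs : List Nat) (v : Nat) :
    (vs.map (fun n : Nat => (n : Int))).foldl min (v : Int) = ((vs.foldl min v : Nat) : Int) := by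
  induction vs generalizing v with
  | nil => rfl
  | cons x xs ih => simp only [List.map_cons, List.foldl_cons, ← ih, Nat.cast_min]

theorem pvNatB_le (log target : List Int) (k : Int) (hk : k ∈ PySem.Set.ofList target) :
    pvNatB log target ≤ pvRatio log target k := by
  unfold pvNatB
  cases hS : (PySem.Set.ofList target).map (pvRatio log target) with
  | nil => simp [List.map_eq_nil_iff.mp hS] at hk
  | cons v vs =>
    show List.foldl min v vs ≤ pvRatio log target k
    have hmem : pvRatio log target k ∈ v :: vs := hS ▸ List.mem_map_of_mem hk
    rcases List.mem_cons.mp hmem with h | h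
    · rw [h]; exact (PySem.List.foldl_min_le vs v).1
    · exact (PySem.List.foldl_min_le vs v).2 _ h

-- A's while loop computes pvNatB whenever the fuel exceeds it
theorem pvLoopA_eq (target : List Int) (hne : target ≠ []) :
    ∀ (fuel : Nat) (log : List Int) (c : Int), pvNatB log target < fuel →
      pvLoopA target fuel log c = c + (pvNatB log target : Int) := by
  intro fuel
  induction fuel with
  | zero => intro log c h; exact absurd h (Nat.not_lt_zero _)
  | succ n ih =>
    intro log c h
    obtain ⟨h1, h2⟩ := pvPassA_spec target log true
    simp only [pvLoopA]
    by_cases hfound : ∀ e ∈ target, target.count e ≤ log.count e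
    · have hft : (pvPassA target true log).1 = true := by
        rw [h1, decide_eq_true hfound]; rfl
      have hpos : ∀ k ∈ target, 0 < target.count k := fun k hk => List.one_le_count_iff.mpr hk
      have hratio : ∀ k ∈ PySem.Set.ofList target,
          pvRatio (pvPassA target true log).2 target k = pvRatio log target k - 1 := by
        intro k hk
        have hk' : k ∈ target := (PySem.Set.mem_ofList target k).mp hk
        unfold pvRatio
        rw [h2 k, Nat.min_eq_right (hfound k hk')]
        conv_rhs => rw [Nat.div_eq_sub_div (hpos k hk') (hfound k hk')]
        simp
      have hone : ∀ k ∈ PySem.Set.ofList target, 1 ≤ pvRatio log target k := by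
        intro k hk
        have hk' : k ∈ target := (PySem.Set.mem_ofList target k).mp hk
        unfold pvRatio
        exact (Nat.one_le_div_iff (hpos k hk')).mpr (hfound k hk')
      have hmapeq : (PySem.Set.ofList target).map (pvRatio (pvPassA target true log).2 target)
          = ((PySem.Set.ofList target).map (pvRatio log target)).map (· - 1) := by
        rw [List.map_map]
        exact List.map_congr_left hratio
      obtain ⟨v, vs, hS⟩ : ∃ v vs, (PySem.Set.ofList target).map (pvRatio log target) = v :: vs := by
        obtain ⟨a, ts, rfl⟩ := List.exists_cons_of_ne_nil hne
        rw [PySem.Set.ofList_cons]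
        exact ⟨_, _, rfl⟩
      have hge1 : 1 ≤ pvNatB log target := by
        unfold pvNatB
        rw [hS]
        show 1 ≤ List.foldl min v vs
        have hall : ∀ y ∈ v :: vs, 1 ≤ y := by
          intro y hy
          rw [← hS] at hy
          obtain ⟨k, hk, rfl⟩ := List.mem_map.mp hy
          exact hone k hk
        rcases PySem.List.foldl_min_mem vs v with h' | h'
        · rw [h']; exact hall v (List.mem_cons_self)
        · exact hall _ (List.mem_cons_of_mem _ h')
      have hnew : pvNatB (pvPassA target true log).2 target = pvNatB log target - 1 := by
        unfold pvNatB
        rw [hmapeq, hS]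
        simp only [List.map_cons]
        exact pv_foldl_min_sub_one vs v
      rw [hft]
      simp only [if_true]
      rw [ih (pvPassA target true log).2 (c + 1) (by omega), hnew]
      have : (1:Nat) ≤ pvNatB log target := hge1
      push_cast [Nat.cast_sub this]
      ring
    · have hff : (pvPassA target true log).1 = false := by
        rw [h1, decide_eq_false hfound]; rfl
      have hzero : pvNatB log target = 0 := by
        push Not at hfound
        obtain ⟨e, he, hlt⟩ := hfound
        have : pvRatio log target e = 0 := Nat.div_eq_of_lt hlt
        have := pvNatB_le log target e ((PySem.Set.mem_ofList target e).mpr he)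
        omega
      rw [hff]
      simp [hzero]

-- B's port computes pvNatB
theorem alt_eq_natB (log target : List Int) :
    countMaxOperation_alt log target = (pvNatB log target : Int) := by
  unfold countMaxOperation_alt pvNatB
  simp only [PySem.Dict.foldl_insert_getD_add_one_eq_counter, PySem.Dict.items_counter,
    List.map_map]
  have heq : ((fun p : Int × Int => PySem.Int.floordiv ((PySem.Dict.counter log).getD p.1 0) p.2)
      ∘ (fun k : Int => (k, (target.count k : Int)))) = (fun n : Nat => (n : Int)) ∘ pvRatio log target := by
    funext k
    simp [Function.comp, PySem.Dict.getD_counter, pvRatio, PySem.Int.floordiv_natCast]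
  rw [heq, ← List.map_map]
  cases hS : (PySem.Set.ofList target).map (pvRatio log target) with
  | nil => simp
  | cons v vs => simp [pv_foldl_min_int_cast]

-- ===== VERDICT (by name: the statement is the Claim_ definition above) =====
theorem countMaxOperation_spec : Claim_equal_countMaxOperation := by
  intro log target _hdom hpre
  unfold Spec_countMaxOperation
  rw [alt_eq_natB]
  have hbound : pvNatB log target < log.length + 1 := by
    obtain ⟨a, ts, rfl⟩ := List.exists_cons_of_ne_nil hpre
    have ha : a ∈ PySem.Set.ofList (a :: ts) := (PySem.Set.mem_ofList _ _).mpr List.mem_cons_self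
    have hr1 := pvNatB_le log (a :: ts) a ha
    have hr2 : pvRatio log (a :: ts) a ≤ log.count a := Nat.div_le_self _ _
    have hr3 : log.count a ≤ log.length := List.count_le_length
    omega
  unfold countMaxOperation
  rw [pvLoopA_eq target hpre (log.length + 1) log 0 hbound]
  simp
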